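-- pv_equiv track=rewrite | github.com/adrienycart/PEAMT | classifier_utils.py | get_feature_labels
-- ===== SOURCE A (Python) =====
-- def get_feature_labels(features_to_use):
--
--     def get_feat_names(feat):
--         if feat == 'framewise_0.01':
--             return ["framewise_P","framewise_R","framewise_F"]
--         elif 'notewise_On_' in feat:
--             return ["notewise_On_P",
--             "notewise_On_R",
--             "notewise_On_F"]
--         elif 'notewise_OnOff_' in feat:
--             return ["notewise_OnOff_P",
--                 "notewise_OnOff_R",
--                 "notewise_OnOff_F"]
--         elif feat == "high_f":
--             return ["high_f_P",
--             "high_f_R",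
--             "high_f_F",]
--         elif feat == "low_f":
--             return ["low_f_P",
--             "low_f_R",
--             "low_f_F",]
--         elif feat == "high_n":
--             return ["high_n_P",
--             "high_n_R",
--             "high_n_F",]
--         elif feat == "low_n":
--             return ["low_n_P",
--             "low_n_R",
--             "low_n_F"]
--         elif feat == "loud_fn":
--             return ["loud_fn"]
--         elif feat == "loud_ratio_fn":
--             return ["loud_ratio_fn"]
--         elif feat == "out_key":
--             return ["out_key_fp",
--             "out_key_all",]
--         elif feat == "out_key_bin":
--             return ["out_key_bin_fp",
--             "out_key_bin_all",]
--         elif feat == "repeat":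
--             return ["repeat_fp",
--             "repeat_all",]
--         elif feat == "merge":
--             return ["merge_fp",
--             "merge_all",]
--         elif feat == "semitone_f":
--             return ["semitone_f_fp",
--             "semitone_f_all"]
--         elif feat == "octave_f":
--             return ["octave_f_fp",
--             "octave_f_all"]
--         elif feat == "third_harmonic_f":
--             return ["third_harmonic_f_fp",
--             "third_harmonic_f_all",]
--         elif feat == "semitone_n":
--             return ["semitone_n_fp",
--             "semitone_n_all",]
--         elif feat == "octave_n":
--             return ["octave_n_fp",
--             "octave_n_all",]
--         elif feat == "third_harmonic_n":
--             return ["third_harmonic_n_fp",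
--             "third_harmonic_n_all",]
--         elif feat == "poly_diff":
--             return ['poly_diff_mean','poly_diff_std','poly_diff_min','poly_diff_max']
--         elif feat == "rhythm_hist":
--             return ['rhythm_hist_out','rhythm_hist_diff']
--         elif feat == "rhythm_disp_std":
--             return ['rhythm_disp_std_mean','rhythm_disp_std_min','rhythm_disp_std_max']
--         elif feat == "rhythm_disp_drift":
--             return ['rhythm_disp_drift_mean','rhythm_disp_drift_min','rhythm_disp_drift_max']
--         elif feat == 'cons_hut78_output':
--             return ['cons_hut78_output_mean','cons_hut78_output_std','cons_hut78_output_max','cons_hut78_output_min']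
--         elif feat == 'cons_har18_output':
--             return ['cons_har18_output_mean','cons_har18_output_std','cons_har18_output_max','cons_har18_output_min']
--         elif feat == 'cons_har19_output':
--             return ['cons_har19_output_mean','cons_har19_output_std','cons_har19_output_max','cons_har19_output_min']
--         elif feat == 'cons_hut78_diff':
--             return ['cons_hut78_diff_mean','cons_hut78_diff_std','cons_hut78_diff_max','cons_hut78_diff_min']
--         elif feat == 'cons_har18_diff':
--             return ['cons_har18_diff_mean','cons_har18_diff_std','cons_har18_diff_max','cons_har18_diff_min']
--         elif feat == 'cons_har19_diff':
--             return ['cons_har19_diff_mean','cons_har19_diff_std','cons_har19_diff_max','cons_har19_diff_min']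
--         elif feat == 'valid_cons':
--             return ['cons_hut78_output_mean','cons_hut78_output_std','cons_hut78_output_max','cons_har18_output_mean','cons_har18_output_std','cons_har18_output_min','cons_har19_output_mean','cons_har19_output_std']
--         else:
--             raise ValueError('Feature not understood! '+feat)
--
--     return sum([get_feat_names(feat) for feat in features_to_use],[])
-- ===== SOURCE B (Python) =====
-- # B synthesizes each label as base + suffix from compact suffix schemes,
-- # instead of storing every full label string as in A's elif ladder.
--
-- _PRF = ('_P', '_R', '_F')
-- _FP_ALL = ('_fp', '_all')
-- _STATS = ('_mean', '_std', '_max', '_min')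
--
-- _SUFFIXES = {
--     'high_f': _PRF, 'low_f': _PRF, 'high_n': _PRF, 'low_n': _PRF,
--     'loud_fn': ('',), 'loud_ratio_fn': ('',),
--     'out_key': _FP_ALL, 'out_key_bin': _FP_ALL, 'repeat': _FP_ALL,
--     'merge': _FP_ALL, 'semitone_f': _FP_ALL, 'octave_f': _FP_ALL,
--     'third_harmonic_f': _FP_ALL, 'semitone_n': _FP_ALL, 'octave_n': _FP_ALL,
--     'third_harmonic_n': _FP_ALL,
--     'poly_diff': ('_mean', '_std', '_min', '_max'),
--     'rhythm_hist': ('_out', '_diff'),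
--     'rhythm_disp_std': ('_mean', '_min', '_max'),
--     'rhythm_disp_drift': ('_mean', '_min', '_max'),
--     'cons_hut78_output': _STATS, 'cons_har18_output': _STATS,
--     'cons_har19_output': _STATS, 'cons_hut78_diff': _STATS,
--     'cons_har18_diff': _STATS, 'cons_har19_diff': _STATS,
-- }
--
-- _VALID_CONS = [
--     ('cons_hut78_output', ('_mean', '_std', '_max')),
--     ('cons_har18_output', ('_mean', '_std', '_min')),
--     ('cons_har19_output', ('_mean', '_std')),
-- ]
--
--
-- def _scheme(feat):
--     """Return a list of (base, suffixes) pairs whose expansion is feat's labels."""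
--     if 'notewise_On_' in feat:
--         return [('notewise_On', _PRF)]
--     if 'notewise_OnOff_' in feat:
--         return [('notewise_OnOff', _PRF)]
--     if feat == 'framewise_0.01':
--         return [('framewise', _PRF)]
--     if feat == 'valid_cons':
--         return _VALID_CONS
--     try:
--         return [(feat, _SUFFIXES[feat])]
--     except KeyError:
--         raise ValueError('Feature not understood! ' + feat)
--
--
-- def get_feature_labels(features_to_use):
--     out = []
--     for feat in features_to_use:
--         for base, suffixes in _scheme(feat):
--             for s in suffixes:
--                 out.append(base + s)
--     return out
-- ===== Notes on version B (the rewrite author's own statement) =====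
-- stated objective: alternative
-- what changed: Instead of A's 30-branch elif ladder returning stored full label lists, B classifies each feature into a compact (base, suffix-scheme) rule and synthesizes every label by string concatenation base+suffix, flattening with an explicit accumulator loop instead of Python's sum over the list of lists.
import Mathlib
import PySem

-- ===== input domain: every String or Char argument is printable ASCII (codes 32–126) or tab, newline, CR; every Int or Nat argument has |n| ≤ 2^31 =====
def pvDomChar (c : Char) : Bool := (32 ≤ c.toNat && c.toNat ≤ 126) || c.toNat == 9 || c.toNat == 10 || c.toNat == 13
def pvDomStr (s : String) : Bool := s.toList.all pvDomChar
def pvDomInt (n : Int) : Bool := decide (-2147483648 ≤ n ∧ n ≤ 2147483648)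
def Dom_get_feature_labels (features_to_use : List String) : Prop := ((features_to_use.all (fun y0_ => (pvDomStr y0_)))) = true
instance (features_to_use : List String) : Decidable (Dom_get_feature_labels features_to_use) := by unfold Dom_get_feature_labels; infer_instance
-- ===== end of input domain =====

-- B synthesizes each label as base + suffix from compact (base, suffix-scheme) rules
-- instead of A's elif ladder of stored full label lists; objective: alternative.
-- Both raise ValueError on an unknown feature: Pre_ excludes those inputs.

-- ===== PORT A =====
-- A's inner get_feat_names; 'none' = the ValueError branch (excluded by Pre_).
def pvFeatNamesA (feat : String) : Option (List String) :=
  if feat == "framewise_0.01" then some ["framewise_P", "framewise_R", "framewise_F"]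
  else if PySem.Str.isIn "notewise_On_" feat then
    some ["notewise_On_P", "notewise_On_R", "notewise_On_F"]
  else if PySem.Str.isIn "notewise_OnOff_" feat then
    some ["notewise_OnOff_P", "notewise_OnOff_R", "notewise_OnOff_F"]
  else if feat == "high_f" then some ["high_f_P", "high_f_R", "high_f_F"]
  else if feat == "low_f" then some ["low_f_P", "low_f_R", "low_f_F"]
  else if feat == "high_n" then some ["high_n_P", "high_n_R", "high_n_F"]
  else if feat == "low_n" then some ["low_n_P", "low_n_R", "low_n_F"]
  else if feat == "loud_fn" then some ["loud_fn"]
  else if feat == "loud_ratio_fn" then some ["loud_ratio_fn"]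
  else if feat == "out_key" then some ["out_key_fp", "out_key_all"]
  else if feat == "out_key_bin" then some ["out_key_bin_fp", "out_key_bin_all"]
  else if feat == "repeat" then some ["repeat_fp", "repeat_all"]
  else if feat == "merge" then some ["merge_fp", "merge_all"]
  else if feat == "semitone_f" then some ["semitone_f_fp", "semitone_f_all"]
  else if feat == "octave_f" then some ["octave_f_fp", "octave_f_all"]
  else if feat == "third_harmonic_f" then some ["third_harmonic_f_fp", "third_harmonic_f_all"]
  else if feat == "semitone_n" then some ["semitone_n_fp", "semitone_n_all"]
  else if feat == "octave_n" then some ["octave_n_fp", "octave_n_all"]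
  else if feat == "third_harmonic_n" then some ["third_harmonic_n_fp", "third_harmonic_n_all"]
  else if feat == "poly_diff" then
    some ["poly_diff_mean", "poly_diff_std", "poly_diff_min", "poly_diff_max"]
  else if feat == "rhythm_hist" then some ["rhythm_hist_out", "rhythm_hist_diff"]
  else if feat == "rhythm_disp_std" then
    some ["rhythm_disp_std_mean", "rhythm_disp_std_min", "rhythm_disp_std_max"]
  else if feat == "rhythm_disp_drift" then
    some ["rhythm_disp_drift_mean", "rhythm_disp_drift_min", "rhythm_disp_drift_max"]
  else if feat == "cons_hut78_output" then
    some ["cons_hut78_output_mean", "cons_hut78_output_std", "cons_hut78_output_max", "cons_hut78_output_min"]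
  else if feat == "cons_har18_output" then
    some ["cons_har18_output_mean", "cons_har18_output_std", "cons_har18_output_max", "cons_har18_output_min"]
  else if feat == "cons_har19_output" then
    some ["cons_har19_output_mean", "cons_har19_output_std", "cons_har19_output_max", "cons_har19_output_min"]
  else if feat == "cons_hut78_diff" then
    some ["cons_hut78_diff_mean", "cons_hut78_diff_std", "cons_hut78_diff_max", "cons_hut78_diff_min"]
  else if feat == "cons_har18_diff" then
    some ["cons_har18_diff_mean", "cons_har18_diff_std", "cons_har18_diff_max", "cons_har18_diff_min"]
  else if feat == "cons_har19_diff" then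
    some ["cons_har19_diff_mean", "cons_har19_diff_std", "cons_har19_diff_max", "cons_har19_diff_min"]
  else if feat == "valid_cons" then
    some ["cons_hut78_output_mean", "cons_hut78_output_std", "cons_hut78_output_max",
          "cons_har18_output_mean", "cons_har18_output_std", "cons_har18_output_min",
          "cons_har19_output_mean", "cons_har19_output_std"]
  else none  -- raise ValueError('Feature not understood! '+feat): excluded by Pre_

-- sum([get_feat_names(feat) for feat in features_to_use], []); on the ValueError branch
-- (outside Pre_) the port substitutes [] for the raised exception.
def get_feature_labels (features_to_use : List String) : List String :=
  (features_to_use.map (fun feat => (pvFeatNamesA feat).getD [])).foldl (fun acc x => acc ++ x) []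

-- ===== PORT B =====
-- the suffix-scheme constants of Source B
def pvPRF : List String := ["_P", "_R", "_F"]
def pvFpAll : List String := ["_fp", "_all"]
def pvStats : List String := ["_mean", "_std", "_max", "_min"]

-- _SUFFIXES dict literal of Source B
def pvSuffixes : PySem.Dict String (List String) := PySem.Dict.ofList
  [("high_f", pvPRF), ("low_f", pvPRF), ("high_n", pvPRF), ("low_n", pvPRF),
   ("loud_fn", [""]), ("loud_ratio_fn", [""]),
   ("out_key", pvFpAll), ("out_key_bin", pvFpAll), ("repeat", pvFpAll),
   ("merge", pvFpAll), ("semitone_f", pvFpAll), ("octave_f", pvFpAll),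
   ("third_harmonic_f", pvFpAll), ("semitone_n", pvFpAll), ("octave_n", pvFpAll),
   ("third_harmonic_n", pvFpAll),
   ("poly_diff", ["_mean", "_std", "_min", "_max"]),
   ("rhythm_hist", ["_out", "_diff"]),
   ("rhythm_disp_std", ["_mean", "_min", "_max"]),
   ("rhythm_disp_drift", ["_mean", "_min", "_max"]),
   ("cons_hut78_output", pvStats), ("cons_har18_output", pvStats),
   ("cons_har19_output", pvStats), ("cons_hut78_diff", pvStats),
   ("cons_har18_diff", pvStats), ("cons_har19_diff", pvStats)]

-- _VALID_CONS of Source B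
def pvValidCons : List (String × List String) :=
  [("cons_hut78_output", ["_mean", "_std", "_max"]),
   ("cons_har18_output", ["_mean", "_std", "_min"]),
   ("cons_har19_output", ["_mean", "_std"])]

-- Source B's _scheme; the ValueError branch (dict miss, outside Pre_) yields [] here.
def pvScheme (feat : String) : List (String × List String) :=
  if PySem.Str.isIn "notewise_On_" feat then [("notewise_On", pvPRF)]
  else if PySem.Str.isIn "notewise_OnOff_" feat then [("notewise_OnOff", pvPRF)]
  else if feat == "framewise_0.01" then [("framewise", pvPRF)]
  else if feat == "valid_cons" then pvValidCons
  else match PySem.Dict.get? pvSuffixes feat with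
       | some ss => [(feat, ss)]
       | none => []  -- raise ValueError: excluded by Pre_

-- the triple append-loop of Source B's get_feature_labels
def get_feature_labels_alt (features_to_use : List String) : List String :=
  features_to_use.foldl
    (fun out feat =>
      (pvScheme feat).foldl
        (fun out p => p.2.foldl (fun out s => out ++ [p.1 ++ s]) out) out) []

-- ===== PRECONDITION & SPEC =====
-- Pre_ excludes exactly the inputs on which A raises ValueError ('Feature not understood!'):
-- some feature is neither an exact key nor contains one of the two notewise substrings.
def Pre_get_feature_labels (features_to_use : List String) : Prop :=
  ∀ feat ∈ features_to_use,
    PySem.Str.isIn "notewise_On_" feat = true ∨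
    PySem.Str.isIn "notewise_OnOff_" feat = true ∨
    feat ∈ ["framewise_0.01", "high_f", "low_f", "high_n", "low_n", "loud_fn",
            "loud_ratio_fn", "out_key", "out_key_bin", "repeat", "merge", "semitone_f",
            "octave_f", "third_harmonic_f", "semitone_n", "octave_n", "third_harmonic_n",
            "poly_diff", "rhythm_hist", "rhythm_disp_std", "rhythm_disp_drift",
            "cons_hut78_output", "cons_har18_output", "cons_har19_output",
            "cons_hut78_diff", "cons_har18_diff", "cons_har19_diff", "valid_cons"]
instance (features_to_use : List String) : Decidable (Pre_get_feature_labels features_to_use) := by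
  unfold Pre_get_feature_labels; infer_instance

def pvWitness_get_feature_labels : List String :=
  ["framewise_0.01", "notewise_On_50", "valid_cons", "merge"]

def Spec_get_feature_labels (features_to_use : List String) (out : List String) : Prop := out = get_feature_labels_alt features_to_use
instance (features_to_use : List String) (out : List String) : Decidable (Spec_get_feature_labels features_to_use out) := by unfold Spec_get_feature_labels; infer_instance

-- ===== CLAIM =====
def Claim_equal_get_feature_labels : Prop := ∀ (features_to_use : List String), Dom_get_feature_labels features_to_use → Pre_get_feature_labels features_to_use → Spec_get_feature_labels features_to_use (get_feature_labels features_to_use)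

-- ===== LEMMAS AND PROOFS =====

-- one feature's labels as B computes them (the two inner loops, flattened)
def pvSchemeLabels (feat : String) : List String :=
  (pvScheme feat).flatMap (fun p => p.2.map (fun s => p.1 ++ s))

theorem pv_inner2 (b : String) (ss : List String) (out : List String) :
    ss.foldl (fun out s => out ++ [b ++ s]) out = out ++ ss.map (fun s => b ++ s) := by
  rw [PySem.List.foldl_append_eq_flatMap, ← List.map_eq_flatMap]

theorem pv_pairs_foldl (ps : List (String × List String)) (out : List String) :
    ps.foldl (fun out p => p.2.foldl (fun out s => out ++ [p.1 ++ s]) out) out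
    = out ++ ps.flatMap (fun p => p.2.map (fun s => p.1 ++ s)) := by
  induction ps generalizing out with
  | nil => simp
  | cons p ps ih =>
      rw [List.foldl_cons, ih, pv_inner2, List.flatMap_cons, List.append_assoc]

theorem inner_foldl_eq (feat : String) (out : List String) :
    (pvScheme feat).foldl
      (fun out p => p.2.foldl (fun out s => out ++ [p.1 ++ s]) out) out
    = out ++ pvSchemeLabels feat := pv_pairs_foldl _ _

theorem pv_outer_foldl (l : List String) (acc : List String) :
    l.foldl (fun out feat => (pvScheme feat).foldl
      (fun out p => p.2.foldl (fun out s => out ++ [p.1 ++ s]) out) out) acc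
    = acc ++ l.flatMap pvSchemeLabels := by
  induction l generalizing acc with
  | nil => simp
  | cons x xs ih =>
      rw [List.foldl_cons, ih, inner_foldl_eq, List.flatMap_cons, List.append_assoc]

-- On recognized features, A's label list equals B's synthesized labels.
theorem pvFeatNames_eq (feat : String)
    (h : PySem.Str.isIn "notewise_On_" feat = true ∨
         PySem.Str.isIn "notewise_OnOff_" feat = true ∨
         feat ∈ ["framewise_0.01", "high_f", "low_f", "high_n", "low_n", "loud_fn",
            "loud_ratio_fn", "out_key", "out_key_bin", "repeat", "merge", "semitone_f",
            "octave_f", "third_harmonic_f", "semitone_n", "octave_n", "third_harmonic_n",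
            "poly_diff", "rhythm_hist", "rhythm_disp_std", "rhythm_disp_drift",
            "cons_hut78_output", "cons_har18_output", "cons_har19_output",
            "cons_hut78_diff", "cons_har18_diff", "cons_har19_diff", "valid_cons"]) :
    (pvFeatNamesA feat).getD [] = pvSchemeLabels feat := by
  by_cases h1 : feat = "framewise_0.01"
  · subst h1; decide
  · by_cases h2 : PySem.Str.isIn "notewise_On_" feat = true
    · have h2' : PySem.Chars.isIn ['n','o','t','e','w','i','s','e','_','O','n','_'] feat.toList = true := by
        simpa using h2
      simp [pvFeatNamesA, pvSchemeLabels, pvScheme, h2', h1, pvPRF]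
    · have h2' : ¬ PySem.Chars.isIn ['n','o','t','e','w','i','s','e','_','O','n','_'] feat.toList = true := by
        simpa using h2
      by_cases h3 : PySem.Str.isIn "notewise_OnOff_" feat = true
      · have h3' : PySem.Chars.isIn ['n','o','t','e','w','i','s','e','_','O','n','O','f','f','_'] feat.toList = true := by
          simpa using h3
        simp [pvFeatNamesA, pvSchemeLabels, pvScheme, h2', h3', h1, pvPRF]
      · rcases h with h | h | h
        · exact absurd h h2
        · exact absurd h h3
        · fin_cases h <;> first | (exact absurd rfl h1) | decide

-- ===== VERDICT =====
theorem get_feature_labels_spec : Claim_equal_get_feature_labels := by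
  intro l _ hpre
  unfold Spec_get_feature_labels get_feature_labels get_feature_labels_alt
  rw [PySem.List.foldl_append_eq_flatMap]
  simp only [List.nil_append, List.flatMap_map]
  rw [pv_outer_foldl]
  simp only [List.nil_append]
  exact List.flatMap_congr (fun feat hf => pvFeatNames_eq feat (hpre feat hf))
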